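-- pv_equiv track=rewrite | github.com/chandankumar123456/Intellisense-AI | app/student_knowledge/chunker.py | _find_heading_for_text
-- ===== SOURCE A (Python) =====
-- from typing import List, Dict, Any, Optional
--
-- def _find_heading_for_text(
--     chunk_text: str,
--     full_text: str,
--     line_heading_map: Dict[int, Optional[str]],
-- ) -> Optional[str]:
--     """Find the section heading for a chunk based on its position in the text."""
--     try:
--         # Find approximate line position
--         pos = full_text.find(chunk_text[:50])
--         if pos < 0:
--             return None
--         line_num = full_text[:pos].count("\n")
--         # Walk backward to find nearest heading
--         for l in range(line_num, -1, -1):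
--             if l in line_heading_map and line_heading_map[l]:
--                 return line_heading_map[l]
--     except Exception:
--         pass
--     return None
-- ===== SOURCE B (Python) =====
-- def _find_heading_for_text(chunk_text, full_text, line_heading_map):
--     """Filter truthy headings at lines 0..line_num once and take the max line, instead of walking backward line by line."""
--     pos = full_text.find(chunk_text[:50])
--     if pos < 0:
--         return None
--     line_num = full_text[:pos].count("\n")
--     cands = [k for k, v in line_heading_map.items() if v and 0 <= k <= line_num]
--     if not cands:
--         return None
--     return line_heading_map[max(cands)]
-- ===== Notes on version B (the rewrite author's own statement) =====
-- stated objective: simpler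
-- what changed: Replaces the backward line-by-line scan over range(line_num,-1,-1) with one pass over the dict's items that collects the truthy heading lines in [0, line_num] and returns the heading at the maximum such line.
import Mathlib
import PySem

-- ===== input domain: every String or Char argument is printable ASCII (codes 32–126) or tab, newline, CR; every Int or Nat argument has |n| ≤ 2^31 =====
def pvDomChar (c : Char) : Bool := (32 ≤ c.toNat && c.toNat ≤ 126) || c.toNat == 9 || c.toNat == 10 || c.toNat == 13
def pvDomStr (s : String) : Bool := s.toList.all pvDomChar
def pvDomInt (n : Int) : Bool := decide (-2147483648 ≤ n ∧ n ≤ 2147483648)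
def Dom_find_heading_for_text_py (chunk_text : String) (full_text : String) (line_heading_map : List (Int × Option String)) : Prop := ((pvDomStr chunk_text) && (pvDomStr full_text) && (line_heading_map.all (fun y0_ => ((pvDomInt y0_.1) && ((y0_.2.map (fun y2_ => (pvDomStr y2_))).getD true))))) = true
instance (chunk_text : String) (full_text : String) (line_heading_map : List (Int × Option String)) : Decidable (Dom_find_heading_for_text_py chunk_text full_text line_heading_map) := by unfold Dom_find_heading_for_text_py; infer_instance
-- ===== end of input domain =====

-- B replaces A's backward per-line scan by one filter-then-max pass over the dict items; objective: simpler.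

-- ===== PORT A =====
-- Python truthiness of an Optional[str] value: not None and not "".
def pvTruthy : Option String → Bool
  | some s => decide (s ≠ "")
  | none => false

-- A's loop 'for l in range(line_num, -1, -1): if l in map and map[l]: return map[l]'
def pvFindLoop (d : PySem.Dict Int (Option String)) : List Int → Option String
  | [] => none
  | l :: rest =>
    match d.get? l with
    | some v => if pvTruthy v then v else pvFindLoop d rest
    | none => pvFindLoop d rest

def find_heading_for_text_py (chunk_text : String) (full_text : String) (line_heading_map : List (Int × Option String)) : Option String :=
  let d := PySem.Dict.ofList line_heading_map
  let pos := PySem.Str.find full_text (PySem.Str.slice chunk_text none (some 50))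
  if pos < 0 then none
  else
    let line_num : Int := (PySem.Str.count (PySem.Str.slice full_text none (some pos)) "\n" : Nat)
    pvFindLoop d (PySem.List.pyRange line_num (-1) (-1))

-- ===== PORT B =====
def find_heading_for_text_py_alt (chunk_text : String) (full_text : String) (line_heading_map : List (Int × Option String)) : Option String :=
  let d := PySem.Dict.ofList line_heading_map
  let pos := PySem.Str.find full_text (PySem.Str.slice chunk_text none (some 50))
  if pos < 0 then none
  else
    let line_num : Int := (PySem.Str.count (PySem.Str.slice full_text none (some pos)) "\n" : Nat)
    let cands := (d.items.filter (fun kv => pvTruthy kv.2 && decide (0 ≤ kv.1) && decide (kv.1 ≤ line_num))).map Prod.fst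
    match PySem.List.max? cands (fun x => x) with
    | none => none
    | some k => (d.get? k).getD none

-- ===== PRECONDITION & SPEC =====
def Spec_find_heading_for_text_py (chunk_text : String) (full_text : String) (line_heading_map : List (Int × Option String)) (out : Option String) : Prop := out = find_heading_for_text_py_alt chunk_text full_text line_heading_map
instance (chunk_text : String) (full_text : String) (line_heading_map : List (Int × Option String)) (out : Option String) : Decidable (Spec_find_heading_for_text_py chunk_text full_text line_heading_map out) := by unfold Spec_find_heading_for_text_py; infer_instance

-- ===== CLAIM (what is proved, stated in full; the proofs are below) =====
def Claim_equal_find_heading_for_text_py : Prop := ∀ (chunk_text : String) (full_text : String) (line_heading_map : List (Int × Option String)), Dom_find_heading_for_text_py chunk_text full_text line_heading_map → Spec_find_heading_for_text_py chunk_text full_text line_heading_map (find_heading_for_text_py chunk_text full_text line_heading_map)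

-- ===== LEMMAS AND PROOFS =====

-- B's tail (filter + max + lookup) as a function of the bound, for the induction.
def pvBest (d : PySem.Dict Int (Option String)) (m : Int) : Option String :=
  match PySem.List.max? ((d.items.filter (fun kv => pvTruthy kv.2 && decide (0 ≤ kv.1) && decide (kv.1 ≤ m))).map Prod.fst) (fun x => x) with
  | none => none
  | some k => (d.get? k).getD none

lemma pyRange_down_zero : PySem.List.pyRange (0 : Int) (-1) (-1) = [0] := by decide

lemma pyRange_down_succ (n : Nat) :
    PySem.List.pyRange ((n : Int) + 1) (-1) (-1) = ((n : Int) + 1) :: PySem.List.pyRange (n : Int) (-1) (-1) := by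
  rw [PySem.List.pyRange_neg_one, PySem.List.pyRange_neg_one]
  have h1 : (((n : Int) + 1) - (-1)).toNat = n + 2 := by omega
  have h2 : ((n : Int) - (-1)).toNat = n + 1 := by omega
  rw [h1, h2, List.range_succ_eq_map]
  simp only [List.map_cons, List.map_map]
  refine List.cons_eq_cons.mpr ⟨by norm_num, ?_⟩
  exact List.map_congr_left (fun k _ => by simp only [Function.comp]; push_cast; ring)

lemma foldl_max_le {t : List Int} {x m : Int} (hx : x ≤ m) (ht : ∀ y ∈ t, y ≤ m) :
    t.foldl max x ≤ m := by
  induction t generalizing x with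
  | nil => exact hx
  | cons a t ih =>
    exact ih (max_le hx (ht a (by simp))) (fun y hy => ht y (by simp [hy]))

lemma max?_id_eq_of {xs : List Int} {m : Int} (hm : m ∈ xs) (hmax : ∀ y ∈ xs, y ≤ m) :
    PySem.List.max? xs (fun x => x) = some m := by
  cases xs with
  | nil => cases hm
  | cons x t =>
    rw [PySem.List.max?_id_cons]
    refine congrArg some (le_antisymm (foldl_max_le (hmax x (by simp)) (fun y hy => hmax y (by simp [hy]))) ?_)
    rcases List.mem_cons.mp hm with rfl | hmt
    · exact (PySem.List.le_foldl_max t m).1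
    · exact (PySem.List.le_foldl_max t x).2 m hmt

lemma best_of_truthy (d : PySem.Dict Int (Option String)) {m : Int} {v : Option String}
    (hm : 0 ≤ m) (hg : d.get? m = some v) (ht : pvTruthy v = true) : pvBest d m = v := by
  have hmem : (m, v) ∈ d.items := PySem.Dict.mem_items_of_get?_eq_some d hg
  have hmem' : m ∈ (d.items.filter (fun kv => pvTruthy kv.2 && decide (0 ≤ kv.1) && decide (kv.1 ≤ m))).map Prod.fst := by
    simp only [List.mem_map, List.mem_filter]
    exact ⟨(m, v), ⟨hmem, by simp [ht, hm]⟩, rfl⟩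
  have hall : ∀ y ∈ (d.items.filter (fun kv => pvTruthy kv.2 && decide (0 ≤ kv.1) && decide (kv.1 ≤ m))).map Prod.fst, y ≤ m := by
    intro y hy
    simp only [List.mem_map, List.mem_filter, Bool.and_eq_true, decide_eq_true_eq] at hy
    obtain ⟨kv, ⟨_, _, hle⟩, rfl⟩ := hy
    exact hle
  unfold pvBest
  rw [max?_id_eq_of hmem' hall]
  simp [hg]

lemma best_step (d : PySem.Dict Int (Option String)) (hnd : d.keys.Nodup) (n : Nat)
    (hnt : ∀ v, d.get? ((n : Int) + 1) = some v → pvTruthy v = false) :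
    pvBest d ((n : Int) + 1) = pvBest d (n : Int) := by
  unfold pvBest
  have hf : d.items.filter (fun kv => pvTruthy kv.2 && decide (0 ≤ kv.1) && decide (kv.1 ≤ (n : Int) + 1))
      = d.items.filter (fun kv => pvTruthy kv.2 && decide (0 ≤ kv.1) && decide (kv.1 ≤ (n : Int))) := by
    apply List.filter_congr
    rintro ⟨k, w⟩ hkv
    by_cases ht : pvTruthy w = true
    · have hne : k ≠ (n : Int) + 1 := by
        intro he
        subst he
        exact absurd (hnt w (PySem.Dict.get?_of_mem_items d hkv hnd)) (by simp [ht])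
      have hiff : (k ≤ (n : Int) + 1) ↔ (k ≤ (n : Int)) := by omega
      simp [hiff]
    · simp only [Bool.not_eq_true] at ht
      simp [ht]
  rw [hf]

lemma best_zero (d : PySem.Dict Int (Option String)) (hnd : d.keys.Nodup)
    (hnt : ∀ v, d.get? 0 = some v → pvTruthy v = false) : pvBest d 0 = none := by
  unfold pvBest
  have hf : d.items.filter (fun kv => pvTruthy kv.2 && decide (0 ≤ kv.1) && decide (kv.1 ≤ (0 : Int))) = [] := by
    rw [List.filter_eq_nil_iff]
    rintro ⟨k, w⟩ hkv h
    simp only [Bool.and_eq_true, decide_eq_true_eq] at h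
    obtain ⟨⟨ht, h0⟩, hle⟩ := h
    have hk : k = 0 := le_antisymm hle h0
    subst hk
    exact absurd (hnt w (PySem.Dict.get?_of_mem_items d hkv hnd)) (by simp [ht])
  rw [hf]
  rw [show PySem.List.max? (List.map Prod.fst ([] : List (Int × Option String))) (fun x => x) = none from (PySem.List.max?_eq_none_iff _ _).mpr rfl]

-- The key equivalence: the backward scan from n equals lookup at the max truthy key ≤ n.
lemma loop_eq_best (d : PySem.Dict Int (Option String)) (hnd : d.keys.Nodup) (n : Nat) :
    pvFindLoop d (PySem.List.pyRange (n : Int) (-1) (-1)) = pvBest d (n : Int) := by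
  induction n with
  | zero =>
    rw [Nat.cast_zero, pyRange_down_zero]
    cases hg : d.get? (0 : Int) with
    | none =>
      simp only [pvFindLoop, hg]
      exact (best_zero d hnd (by intro v hv; rw [hg] at hv; cases hv)).symm
    | some v =>
      cases ht : pvTruthy v with
      | true =>
        simp only [pvFindLoop, hg, ht]
        exact (best_of_truthy d le_rfl hg ht).symm
      | false =>
        simp only [pvFindLoop, hg, ht]
        refine (best_zero d hnd ?_).symm
        intro w hw
        rw [hg] at hw
        injection hw with h
        subst h
        exact ht
  | succ n ih =>
    have hc : ((n + 1 : Nat) : Int) = (n : Int) + 1 := by push_cast; ring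
    rw [hc, pyRange_down_succ]
    cases hg : d.get? ((n : Int) + 1) with
    | none =>
      simp only [pvFindLoop, hg]
      rw [best_step d hnd n (by intro v hv; rw [hg] at hv; cases hv)]
      exact ih
    | some v =>
      cases ht : pvTruthy v with
      | true =>
        simp only [pvFindLoop, hg, ht]
        exact (best_of_truthy d (by omega) hg ht).symm
      | false =>
        simp only [pvFindLoop, hg, ht]
        rw [best_step d hnd n ?_]
        · exact ih
        · intro w hw
          rw [hg] at hw
          injection hw with h
          subst h
          exact ht

-- ===== VERDICT (by name: the statement is the Claim_ definition above) =====
theorem find_heading_for_text_py_spec : Claim_equal_find_heading_for_text_py := by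
  intro chunk_text full_text line_heading_map _
  unfold Spec_find_heading_for_text_py find_heading_for_text_py find_heading_for_text_py_alt
  simp only []
  split_ifs with h
  · rfl
  · exact loop_eq_best _ (PySem.Dict.nodup_keys_ofList _) _
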